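-- pv_equiv track=rewrite | github.com/sillyslux/hexchat | plugins/python/python.py | create_wordeollist
-- ===== SOURCE A (Python) =====
-- def create_wordeollist(words):
--     words = reversed(words)
--     last = None
--     accum = None
--     ret = []
--     for word in words:
--         if accum is None:
--             accum = word
--         elif word:
--             last = accum
--             accum = ' '.join((word, last))
--         ret.insert(0, accum)
--     return ret
-- ===== SOURCE B (Python) =====
-- def create_wordeollist(words):
--     n = len(words)
--     ret = []
--     for i in range(n):
--         parts = list(filter(None, words[i:n-1]))
--         parts.append(words[n-1])
--         ret.append(' '.join(parts))
--     return ret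
-- ===== Notes on version B (the rewrite author's own statement) =====
-- stated objective: alternative
-- what changed: Replaces the reversed-iteration loop threading one running suffix accumulator with an index loop that recomputes each entry independently as the join of filter(None, words[i:n-1]) plus the last word.
import Mathlib
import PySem

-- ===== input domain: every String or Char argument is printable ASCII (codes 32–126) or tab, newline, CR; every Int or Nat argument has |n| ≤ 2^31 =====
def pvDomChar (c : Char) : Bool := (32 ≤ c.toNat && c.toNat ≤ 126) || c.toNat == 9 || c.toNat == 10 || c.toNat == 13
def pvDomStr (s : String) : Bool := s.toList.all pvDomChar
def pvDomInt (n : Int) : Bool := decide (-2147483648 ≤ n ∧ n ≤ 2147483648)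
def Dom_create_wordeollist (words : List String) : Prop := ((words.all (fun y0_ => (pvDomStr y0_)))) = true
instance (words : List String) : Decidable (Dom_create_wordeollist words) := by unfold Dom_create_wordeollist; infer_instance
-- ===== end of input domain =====

-- B replaces A's reversed-iteration running-accumulator loop with an independent per-index
-- recomputation of each suffix join (alternative decomposition, not claimed faster).

-- ===== PORT A =====
-- the 'for word in words' loop: state = (accum : Option String, ret); ret.insert(0, accum) prepends
def pvLoopA : List String → Option String → List String → List String
  | [], _, ret => ret
  | word :: rest, accum, ret =>
    match accum with
    | none => pvLoopA rest (some word) (word :: ret)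
    | some a =>
      if word ≠ "" then
        pvLoopA rest (some (PySem.Str.join " " [word, a])) (PySem.Str.join " " [word, a] :: ret)
      else
        pvLoopA rest (some a) (a :: ret)

def create_wordeollist (words : List String) : List String :=
  pvLoopA words.reverse none []

-- ===== PORT B =====
-- one iteration of B's 'for i in range(n)' body: the entry appended at index i
def pvEntryB (words : List String) (n : Nat) (i : Int) : String :=
  -- parts = list(filter(None, words[i:n-1])) (truthy = non-empty); parts.append(words[n-1]); ' '.join(parts)
  PySem.Str.join " "
    ((PySem.List.slice words (some i) (some ((n : Int) - 1))).filter (fun w => w != "") ++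
      [PySem.List.pyGetD words ((n : Int) - 1) ""])

def create_wordeollist_alt (words : List String) : List String :=
  let n := words.length
  (PySem.List.pyRange 0 (n : Int) 1).foldl (fun ret i => ret ++ [pvEntryB words n i]) []

-- ===== PRECONDITION & SPEC =====
def Spec_create_wordeollist (words : List String) (out : List String) : Prop := out = create_wordeollist_alt words
instance (words : List String) (out : List String) : Decidable (Spec_create_wordeollist words out) := by unfold Spec_create_wordeollist; infer_instance

-- ===== CLAIM (what is proved, stated in full; the proofs are below) =====
def Claim_equal_create_wordeollist : Prop := ∀ (words : List String), Dom_create_wordeollist words → Spec_create_wordeollist words (create_wordeollist words)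

-- ===== LEMMAS AND PROOFS =====

-- reference value: the word-eol entry for a (nonempty) suffix
def pvJ : List String → String
  | [] => ""
  | [w] => w
  | w :: x :: rest => if w = "" then pvJ (x :: rest) else PySem.Str.join " " [w, pvJ (x :: rest)]

-- reference list: one entry per suffix
def pvRef : List String → List String
  | [] => []
  | w :: rest => pvJ (w :: rest) :: pvRef rest

-- one step of A's accumulator update (for a non-first word)
def pvStep (a w : String) : String := if w = "" then a else PySem.Str.join " " [w, a]

-- the accums pushed by the loop, newest first
def pvTrace : List String → String → List String
  | [], _ => []
  | w :: rest, a => pvTrace rest (pvStep a w) ++ [pvStep a w]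

-- the final accumulator
def pvFacc : List String → String → String
  | [], a => a
  | w :: rest, a => pvFacc rest (pvStep a w)

theorem pvJ_cons (w x : String) (l : List String) :
    pvJ (w :: x :: l) = pvStep (pvJ (x :: l)) w := rfl

theorem pvLoopA_some (r : List String) (a : String) (ret : List String) :
    pvLoopA r (some a) ret = pvTrace r a ++ ret := by
  induction r generalizing a ret with
  | nil => simp [pvLoopA, pvTrace]
  | cons w rest ih =>
    by_cases h : w = "" <;>
      simp [pvLoopA, pvTrace, pvStep, h, ih]

theorem pvLoopA_none (w : String) (r : List String) :
    pvLoopA (w :: r) none [] = pvTrace r w ++ [w] := by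
  simp [pvLoopA, pvLoopA_some]

theorem pvTrace_snoc (r : List String) (w : String) (a : String) :
    pvTrace (r ++ [w]) a = pvStep (pvFacc r a) w :: pvTrace r a := by
  induction r generalizing a with
  | nil => simp [pvTrace, pvFacc]
  | cons x rest ih => simp [pvTrace, pvFacc, ih]

theorem pvFacc_snoc (r : List String) (w : String) (a : String) :
    pvFacc (r ++ [w]) a = pvStep (pvFacc r a) w := by
  induction r generalizing a with
  | nil => rfl
  | cons x rest ih => simp [pvFacc, ih]

theorem pvFacc_reverse (ys : List String) (lst : String) :
    pvFacc ys.reverse lst = pvJ (ys ++ [lst]) := by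
  induction ys with
  | nil => rfl
  | cons x t ih =>
    rw [List.reverse_cons, pvFacc_snoc, ih]
    cases t with
    | nil => rfl
    | cons y t' => simp only [List.cons_append, pvJ_cons]

theorem create_eq_ref_concat (ys : List String) (lst : String) :
    create_wordeollist (ys ++ [lst]) = pvRef (ys ++ [lst]) := by
  induction ys with
  | nil => simp [create_wordeollist, pvLoopA, pvRef, pvJ]
  | cons x ys ih =>
    have hrev : ((x :: ys) ++ [lst]).reverse = lst :: (ys.reverse ++ [x]) := by simp
    have hrev' : (ys ++ [lst]).reverse = lst :: ys.reverse := by simp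
    unfold create_wordeollist at *
    rw [hrev, pvLoopA_none, pvTrace_snoc, pvFacc_reverse]
    rw [hrev', pvLoopA_none] at ih
    have htail : pvJ ((x :: ys) ++ [lst]) = pvStep (pvJ (ys ++ [lst])) x := by
      cases ys with
      | nil => rfl
      | cons y t => rfl
    simp only [List.cons_append] at htail ⊢
    rw [pvRef, ← htail, ih]

theorem create_eq_ref (words : List String) :
    create_wordeollist words = pvRef words := by
  rcases List.eq_nil_or_concat words with h | ⟨ys, lst, h⟩
  · subst h; rfl
  · subst h
    rw [List.concat_eq_append]
    exact create_eq_ref_concat ys lst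

theorem pvJoin_singleton (w : String) : PySem.Str.join " " [w] = w := by
  simp [PySem.Str.join, PySem.Chars.join, List.intercalate]

theorem pvJoin_cons (w : String) (z : String) (zs : List String) :
    PySem.Str.join " " (w :: z :: zs) = PySem.Str.join " " [w, PySem.Str.join " " (z :: zs)] := by
  simp [PySem.Str.join, PySem.Chars.join, List.intercalate, List.intersperse]

theorem pvJ_concat (l : List String) (w : String) :
    pvJ (l ++ [w]) = PySem.Str.join " " (l.filter (fun x => x != "") ++ [w]) := by
  induction l with
  | nil => simp [pvJ, pvJoin_singleton]
  | cons x t ih =>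
    have hcons : pvJ ((x :: t) ++ [w]) = pvStep (pvJ (t ++ [w])) x := by
      cases t with
      | nil => rfl
      | cons y t' => rfl
    by_cases h : x = ""
    · rw [hcons, pvStep, if_pos h, ih, h]
      simp
    · have hb : (x != "") = true := by simp [h]
      rw [hcons, pvStep, if_neg h, ih]
      rcases (t.filter (fun x => x != "") ++ [w]).exists_cons_of_ne_nil (by simp) with ⟨z, zs, hz⟩
      rw [hz, ← pvJoin_cons]
      simp [hb, hz]

-- pvRef as a map over suffix indices
theorem pvRef_eq_map (words : List String) :
    pvRef words = (List.range words.length).map (fun k => pvJ (words.drop k)) := by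
  induction words with
  | nil => rfl
  | cons w rest ih =>
    rw [pvRef, ih]
    simp only [List.length_cons, List.range_succ_eq_map, List.map_cons, List.map_map]
    rfl

-- B's entry at index k < n equals the reference entry for the k-th suffix
theorem pvEntryB_eq (words : List String) (k : Nat) (hk : k < words.length) :
    pvEntryB words words.length (k : Int) = pvJ (words.drop k) := by
  rcases List.eq_nil_or_concat words with h | ⟨ys, lst, h⟩
  · subst h; simp at hk
  · subst h
    simp only [List.concat_eq_append] at hk ⊢
    have hn : ((ys ++ [lst]).length : Int) - 1 = ((ys.length : Nat) : Int) := by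
      simp
    have hk' : k ≤ ys.length := by simp at hk; omega
    unfold pvEntryB
    rw [hn, PySem.List.slice_natCast, PySem.List.pyGetD_natCast]
    have hdrop : (ys ++ [lst]).drop k = ys.drop k ++ [lst] := by
      rw [List.drop_append_of_le_length hk']
    have hslice : ((ys ++ [lst]).drop k).take (ys.length - k) = ys.drop k := by
      rw [hdrop, List.take_append_of_le_length (by simp)]
      simp
    have hlast : (ys ++ [lst]).getD ys.length "" = lst := by
      simp [List.getD]
    rw [hslice, hlast, hdrop, pvJ_concat]

theorem create_alt_eq_ref (words : List String) :
    create_wordeollist_alt words = pvRef words := by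
  unfold create_wordeollist_alt
  rw [PySem.List.foldl_append_singleton_eq_map, PySem.List.pyRange_zero_nat, List.map_map,
    pvRef_eq_map]
  simp only [List.nil_append]
  refine List.map_congr_left ?_
  intro k hk
  exact pvEntryB_eq words k (List.mem_range.mp hk)

-- ===== VERDICT (by name: the statement is the Claim_ definition above) =====
theorem create_wordeollist_spec : Claim_equal_create_wordeollist := by
  intro words _
  unfold Spec_create_wordeollist
  rw [create_eq_ref, create_alt_eq_ref]
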